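-- pv_equiv track=rewrite | github.com/joymkj/Labscript-ANU | labscript_suite/labscript_utils/mcs.py | cumulative2bin
-- ===== SOURCE A (Python) =====
-- def cumulative2bin(arr,bin_size):   #bin_size in sample numbers
--     prev_bin = 0
--     index=bin_size-1
--     res = []
--     while(index<len(arr)):
--         res.append(int(arr[index])-prev_bin)
--         prev_bin = int(arr[index])
--         index = index+bin_size
--     if len(res)>1:
--         res[0] = 0
--         res[1] = 0
--     return res
-- ===== SOURCE B (Python) =====
-- def cumulative2bin(arr, bin_size):
--     m = len(arr) // bin_size
--     if m == 0:
--         return []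
--     if m == 1:
--         return [int(arr[bin_size - 1])]
--     return [0, 0] + [int(arr[(k + 1) * bin_size - 1]) - int(arr[k * bin_size - 1])
--                      for k in range(2, m)]
-- ===== Notes on version B (the rewrite author's own statement) =====
-- stated objective: alternative
-- what changed: Replaces A's sequential while-loop carrying a running prev_bin accumulator by a stateless closed-form construction: the bin count m = len(arr)//bin_size is computed arithmetically, the two leading zeros are emitted literally, and each remaining entry is computed independently as arr[(k+1)*bin_size-1] - arr[k*bin_size-1] with two direct reads and no carried state.
import Mathlib
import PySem

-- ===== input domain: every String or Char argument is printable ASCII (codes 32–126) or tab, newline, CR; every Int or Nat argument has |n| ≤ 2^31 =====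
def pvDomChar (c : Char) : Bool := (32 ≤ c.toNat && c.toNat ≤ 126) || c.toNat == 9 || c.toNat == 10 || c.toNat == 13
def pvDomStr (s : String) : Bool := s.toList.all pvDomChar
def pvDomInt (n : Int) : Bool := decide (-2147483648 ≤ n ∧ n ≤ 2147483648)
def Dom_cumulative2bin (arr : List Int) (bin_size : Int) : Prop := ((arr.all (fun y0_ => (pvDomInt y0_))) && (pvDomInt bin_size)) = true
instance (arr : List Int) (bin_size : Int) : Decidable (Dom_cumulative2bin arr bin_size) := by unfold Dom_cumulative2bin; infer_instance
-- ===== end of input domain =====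

-- B re-implements A without the running prev_bin accumulator: the bin count m = len(arr)//bin_size
-- is computed arithmetically, the two leading zeros are emitted literally, and each remaining entry
-- is an independent pairwise read arr[(k+1)*bs-1] - arr[k*bs-1]; alternative decomposition, same cost.

-- ===== PORT A =====
-- the while loop: fuel bounds the iteration count (arr.length suffices for bin_size ≥ 1);
-- pyGet? = none is Python's IndexError, excluded by Pre_.
def cumLoopA (arr : List Int) (bin_size : Int) : Nat → Int → Int → List Int → List Int
  | 0, _, _, res => res
  | fuel + 1, prev_bin, index, res =>
    if index < (arr.length : Int) then
      match PySem.List.pyGet? arr index with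
      | some v => cumLoopA arr bin_size fuel v (index + bin_size) (res ++ [v - prev_bin])
      | none => res
    else res

def cumulative2bin (arr : List Int) (bin_size : Int) : List Int :=
  let res := cumLoopA arr bin_size arr.length 0 (bin_size - 1) []
  if res.length > 1 then 0 :: 0 :: res.drop 2 else res

-- ===== PORT B =====
-- indices (k+1)*bin_size-1 for 0 ≤ k < m are in bounds for bin_size ≥ 1, so getD 0 is exact there
def cumulative2bin_alt (arr : List Int) (bin_size : Int) : List Int :=
  let m := PySem.Int.floordiv (arr.length : Int) bin_size
  if m = 0 then []
  else if m = 1 then [(PySem.List.pyGet? arr (bin_size - 1)).getD 0]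
  else [0, 0] ++ (PySem.List.pyRange 2 m 1).map
    (fun k => (PySem.List.pyGet? arr ((k + 1) * bin_size - 1)).getD 0
            - (PySem.List.pyGet? arr (k * bin_size - 1)).getD 0)

-- ===== PRECONDITION & SPEC =====
-- Pre_ excludes bin_size ≤ 0, where Python A never returns: it raises IndexError (bin_size < 0,
-- or bin_size = 0 on an empty list) or loops forever (bin_size = 0 on a nonempty list).
def Pre_cumulative2bin (arr : List Int) (bin_size : Int) : Prop := 1 ≤ bin_size
instance (arr : List Int) (bin_size : Int) : Decidable (Pre_cumulative2bin arr bin_size) := by unfold Pre_cumulative2bin; infer_instance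
def pvWitness_cumulative2bin : List Int × Int := ([1, 2, 3, 4, 5, 6], 2)

def Spec_cumulative2bin (arr : List Int) (bin_size : Int) (out : List Int) : Prop := out = cumulative2bin_alt arr bin_size
instance (arr : List Int) (bin_size : Int) (out : List Int) : Decidable (Spec_cumulative2bin arr bin_size out) := by unfold Spec_cumulative2bin; infer_instance

-- ===== CLAIM (what is proved, stated in full; the proofs are below) =====
def Claim_equal_cumulative2bin : Prop := ∀ (arr : List Int) (bin_size : Int), Dom_cumulative2bin arr bin_size → Pre_cumulative2bin arr bin_size → Spec_cumulative2bin arr bin_size (cumulative2bin arr bin_size)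

-- ===== LEMMAS AND PROOFS =====

-- adjacent differences with a carried previous value: the value A's loop accumulates
def diffFold (prev : Int) : List Int → List Int
  | [] => []
  | v :: vs => (v - prev) :: diffFold v vs

theorem diffFold_length (xs : List Int) : ∀ p, (diffFold p xs).length = xs.length := by
  induction xs with
  | nil => intro p; rfl
  | cons v vs ih => intro p; simp [diffFold, ih v]

theorem diffFold_getElem (xs : List Int) : ∀ (p : Int) (i : Nat) (h : i < xs.length),
    (diffFold p xs)[i]'(by rw [diffFold_length]; exact h)
      = xs[i] - (if h0 : i = 0 then p else xs[i-1]'(by omega)) := by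
  induction xs with
  | nil => intro p i h; simp at h
  | cons v vs ih =>
    intro p i h
    cases i with
    | zero => simp [diffFold]
    | succ j =>
      simp only [diffFold, List.getElem_cons_succ]
      rw [ih v j (by simpa using h)]
      cases j with
      | zero => simp
      | succ j' => simp

theorem pyRange_pos_cons (a b s : Int) (hs : 0 < s) (hab : a < b) :
    PySem.List.pyRange a b s = a :: PySem.List.pyRange (a + s) b s := by
  rw [PySem.List.pyRange_of_pos a b hs, PySem.List.pyRange_of_pos (a + s) b hs]
  have hcount : (if a < b then ((b - a + s - 1) / s).toNat else 0)
      = (if a + s < b then ((b - (a + s) + s - 1) / s).toNat else 0) + 1 := by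
    rw [if_pos hab]
    have key : (b - a + s - 1) / s = (b - a - 1) / s + 1 := by
      have : b - a + s - 1 = (b - a - 1) + 1 * s := by ring
      rw [this, Int.add_mul_ediv_right _ _ (by omega : s ≠ 0)]
    by_cases h2 : a + s < b
    · have : b - (a + s) + s - 1 = b - a - 1 := by ring
      rw [if_pos h2, this, key]
      have h0 : 0 ≤ (b - a - 1) / s := Int.ediv_nonneg (by omega) (by omega)
      omega
    · rw [if_neg h2, key]
      have : (b - a - 1) / s = 0 := Int.ediv_eq_zero_of_lt (by omega) (by omega)
      omega
  rw [hcount, List.range_succ_eq_map, List.map_cons, List.map_map]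
  congr 1
  · simp
  · apply List.map_congr_left
    intro k _
    simp only [Function.comp_apply, Nat.succ_eq_add_one]
    push_cast
    ring

theorem pyRange_pos_nil (a b s : Int) (hs : 0 < s) (hab : b ≤ a) :
    PySem.List.pyRange a b s = [] := by
  rw [PySem.List.pyRange_of_pos a b hs, if_neg (by omega)]
  simp

theorem length_pyRange_pos_le (a s : Int) (n : Nat) (hs : 0 < s) (ha : 0 ≤ a) :
    (PySem.List.pyRange a (n : Int) s).length ≤ n := by
  rw [PySem.List.pyRange_of_pos a n hs]
  by_cases h : a < (n : Int)
  · rw [if_pos h]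
    simp only [List.length_map, List.length_range]
    have key : ((n : Int) - a + s - 1) / s = ((n : Int) - a - 1) / s + 1 := by
      have h2 : (n : Int) - a + s - 1 = ((n : Int) - a - 1) + 1 * s := by ring
      rw [h2, Int.add_mul_ediv_right _ _ (by omega : s ≠ 0)]
    have h3 : ((n : Int) - a - 1) / s ≤ (n : Int) - a - 1 := Int.ediv_le_self _ (by omega)
    have h4 : 0 ≤ ((n : Int) - a - 1) / s := Int.ediv_nonneg (by omega) (by omega)
    omega
  · rw [if_neg h]; simp

theorem cumLoopA_eq (arr : List Int) (s : Int) (hs : 1 ≤ s) :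
    ∀ (fuel : Nat) (i prev : Int) (res : List Int), 0 ≤ i →
      (PySem.List.pyRange i (arr.length : Int) s).length ≤ fuel →
      cumLoopA arr s fuel prev i res =
        res ++ diffFold prev ((PySem.List.pyRange i (arr.length : Int) s).map
          (fun j => (PySem.List.pyGet? arr j).getD 0)) := by
  intro fuel
  induction fuel with
  | zero =>
    intro i prev res _ hlen
    have : PySem.List.pyRange i (arr.length : Int) s = [] := by
      cases h : PySem.List.pyRange i (arr.length : Int) s with
      | nil => rfl
      | cons x xs => rw [h] at hlen; simp at hlen
    rw [this]; simp [cumLoopA, diffFold]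
  | succ fuel ih =>
    intro i prev res hi hlen
    by_cases hlt : i < (arr.length : Int)
    · have hcons := pyRange_pos_cons i (arr.length : Int) s (by omega) hlt
      have hget : PySem.List.pyGet? arr i = some (arr.get ⟨i.toNat, by omega⟩) := by
        have := PySem.List.pyGet?_of_nonneg (xs := arr) (i := i) hi
        rw [this]
        simp [List.getElem?_eq_getElem (by omega : i.toNat < arr.length)]
      rw [hcons] at hlen ⊢
      simp only [List.length_cons] at hlen
      simp only [cumLoopA, if_pos hlt, hget, List.map_cons, diffFold, Option.getD_some]
      rw [ih (i + s) _ _ (by omega) (by omega)]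
      simp
    · have hnil := pyRange_pos_nil i (arr.length : Int) s (by omega) (by omega)
      rw [hnil]
      simp [cumLoopA, if_neg hlt, diffFold]

-- the sampled values, as a function of the bin number k
theorem vals_eq_range (arr : List Int) (s : Int) (hs : 1 ≤ s) :
    (PySem.List.pyRange (s - 1) (arr.length : Int) s).map
        (fun j => (PySem.List.pyGet? arr j).getD 0)
      = (List.range (arr.length / s.toNat)).map
        (fun (k : Nat) => (PySem.List.pyGet? arr (((k : Int) + 1) * s - 1)).getD 0) := by
  have hs0 : (0 : Int) < s := by omega
  rw [PySem.List.pyRange_of_pos _ _ hs0]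
  by_cases h : s - 1 < (arr.length : Int)
  · rw [if_pos h]
    have hS : ((s.toNat : Int)) = s := by omega
    have hcount : (((arr.length : Int) - (s - 1) + s - 1) / s).toNat = arr.length / s.toNat := by
      have harg : (arr.length : Int) - (s - 1) + s - 1 = (arr.length : Int) := by ring
      rw [harg]
      calc ((arr.length : Int) / s).toNat
          = ((arr.length : Int) / ((s.toNat : Nat) : Int)).toNat := by rw [hS]
        _ = (((arr.length / s.toNat : Nat) : Int)).toNat := by rw [← Int.natCast_ediv]
        _ = arr.length / s.toNat := Int.toNat_natCast _
    rw [hcount, List.map_map]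
    apply List.map_congr_left
    intro k _
    simp only [Function.comp_apply]
    congr 1
    push_cast
    ring
  · rw [if_neg h]
    have : arr.length / s.toNat = 0 := Nat.div_eq_of_lt (by omega)
    rw [this]
    simp

-- ===== VERDICT (by name: the statement is the Claim_ definition above) =====
theorem cumulative2bin_spec : Claim_equal_cumulative2bin := by
  intro arr s _ hpre
  unfold Spec_cumulative2bin cumulative2bin cumulative2bin_alt
  have hs : (1 : Int) ≤ s := hpre
  have hS : ((s.toNat : Int)) = s := by omega
  have hm : PySem.Int.floordiv (arr.length : Int) s = ((arr.length / s.toNat : Nat) : Int) := by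
    rw [← hS]
    exact PySem.Int.floordiv_natCast arr.length s.toNat
  have hlen : (PySem.List.pyRange (s - 1) (arr.length : Int) s).length ≤ arr.length :=
    length_pyRange_pos_le (s - 1) s arr.length (by omega) (by omega)
  rw [cumLoopA_eq arr s hs arr.length (s - 1) 0 [] (by omega) hlen]
  simp only [List.nil_append]
  rw [vals_eq_range arr s hs, hm]
  set M := arr.length / s.toNat with hM
  set f : Nat → Int := fun (k : Nat) => (PySem.List.pyGet? arr (((k : Int) + 1) * s - 1)).getD 0 with hf
  have hlenres : (diffFold 0 ((List.range M).map f)).length = M := by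
    rw [diffFold_length]; simp
  by_cases h0 : M = 0
  · rw [h0]
    simp [diffFold]
  · by_cases h1 : M = 1
    · rw [h1] at hlenres ⊢
      rw [if_neg (by rw [hlenres]; omega)]
      rw [if_neg (show ¬((1 : Nat) : Int) = 0 by norm_num), if_pos (by norm_num)]
      simp only [List.range_one, List.map_cons, List.map_nil, diffFold, sub_zero, hf]
      have harg : ((((0 : Nat) : Int) + 1) * s - 1) = s - 1 := by push_cast; ring
      rw [harg]
    · have h2 : 2 ≤ M := by omega
      rw [if_pos (by rw [hlenres]; omega)]
      rw [if_neg (show ¬((M : Nat) : Int) = 0 by exact_mod_cast h0),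
          if_neg (show ¬((M : Nat) : Int) = 1 by exact_mod_cast h1)]
      rw [PySem.List.pyRange_one 2 (M : Int)]
      have hMt : (((M : Int) - 2)).toNat = M - 2 := by omega
      rw [hMt, List.map_map]
      simp only [List.cons_append, List.nil_append]
      congr 1
      congr 1
      apply List.ext_getElem
      · simp [hlenres]
      · intro i hi1 hi2
        simp only [List.length_drop, hlenres] at hi1
        rw [List.getElem_drop]
        rw [diffFold_getElem ((List.range M).map f) 0 (2 + i) (by simp; omega)]
        rw [dif_neg (by omega)]
        have e1 : ((List.range M).map f)[2 + i]'(by simp; omega) = f (2 + i) := by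
          simp
        have e2 : ((List.range M).map f)[2 + i - 1]'(by simp; omega) = f (1 + i) := by
          have h21 : 2 + i - 1 = 1 + i := by omega
          simp [h21]
        rw [e1, e2]
        simp only [List.getElem_map, List.getElem_range, Function.comp_apply, hf]
        congr 2
        all_goals (push_cast; ring)
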